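-- pv_equiv track=rewrite | github.com/rjfs/kickstart | 2020/c/countdowns.py | solve
-- ===== SOURCE A (Python) =====
-- def solve(n, k, seq):
--     prev = None
--     in_seq = False
--     cnt = 0
--     for sc in seq.split():
--         c = int(sc)
--         if in_seq:
--             if c != prev - 1:
--                 in_seq = False
--             elif c == 1:
--                 in_seq = False
--                 cnt += 1
--         if c == k:
--             in_seq = True
--
--         prev = c
--
--     return cnt
-- ===== SOURCE B (Python) =====
-- def _descends(nums, j, expect):
--     # walk forward while the values count down; succeed on reaching 1
--     while j < len(nums) and nums[j] == expect:
--         if expect == 1: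
--             return True
--         j += 1
--         expect -= 1
--     return False
--
--
-- def solve(n, k, seq):
--     nums = [int(t) for t in seq.split()]
--     return sum(1 for i in range(len(nums))
--                if nums[i] == k and _descends(nums, i + 1, k - 1))
-- ===== Notes on version B (the rewrite author's own statement) =====
-- stated objective: alternative
-- what changed: Replaces A's single-pass prev/in_seq state machine with parsing the tokens once into a list and independently checking, from every position holding k, whether a contiguous countdown k-1..1 follows.
import Mathlib
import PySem

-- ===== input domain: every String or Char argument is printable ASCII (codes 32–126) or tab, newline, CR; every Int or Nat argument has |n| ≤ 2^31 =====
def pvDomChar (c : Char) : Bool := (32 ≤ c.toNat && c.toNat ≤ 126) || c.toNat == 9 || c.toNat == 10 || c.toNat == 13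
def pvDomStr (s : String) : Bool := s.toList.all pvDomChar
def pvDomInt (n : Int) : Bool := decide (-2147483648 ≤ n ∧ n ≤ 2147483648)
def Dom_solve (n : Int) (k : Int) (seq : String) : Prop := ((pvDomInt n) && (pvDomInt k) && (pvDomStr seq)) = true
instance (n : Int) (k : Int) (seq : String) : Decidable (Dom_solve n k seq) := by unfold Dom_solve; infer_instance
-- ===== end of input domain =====

-- B replaces A's single-pass prev/in_seq state machine by an independent
-- descent check from every position holding k (objective: alternative decomposition).
set_option maxRecDepth 4000


-- ===== PORT A =====
-- one loop iteration of A; int(sc) is PySem.Int.ofStr? (getD 0 unreachable inside Pre_);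
-- prev.getD 0 is only read when inSeq = true, where prev is always some _.
def stepA (k : Int) (st : Option Int × Bool × Int) (sc : String) : Option Int × Bool × Int :=
  let c := (PySem.Int.ofStr? sc).getD 0
  let prev := st.1
  let inSeq := st.2.1
  let cnt := st.2.2
  let p := if inSeq then
             (if c ≠ prev.getD 0 - 1 then (false, cnt)
              else if c = 1 then (false, cnt + 1)
              else (inSeq, cnt))
           else (inSeq, cnt)
  let inSeq' := if c = k then true else p.1
  (some c, inSeq', p.2)

def solve (n : Int) (k : Int) (seq : String) : Int :=
  ((PySem.Str.split₀ seq).foldl (stepA k) (none, false, 0)).2.2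

-- ===== PORT B =====
-- _descends: while loop on an index (j stays ≥ 0, so a Nat index is exact)
def descendsB (nums : List Int) (j : Nat) (expect : Int) : Bool :=
  if h : j < nums.length then
    if nums[j] = expect then
      if expect = 1 then true
      else descendsB nums (j + 1) (expect - 1)
    else false
  else false
termination_by nums.length - j
decreasing_by omega

def solve_alt (n : Int) (k : Int) (seq : String) : Int :=
  let nums := (PySem.Str.split₀ seq).map (fun t => (PySem.Int.ofStr? t).getD 0)
  -- sum(1 for i in range(len(nums)) if nums[i] == k and _descends(nums, i+1, k-1))
  (List.range nums.length).foldl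
    (fun cnt i => if nums.getD i 0 = k ∧ descendsB nums (i + 1) (k - 1) then cnt + 1 else cnt) 0

-- ===== PRECONDITION & SPEC =====
-- Pre_ excludes exactly the inputs where int(token) raises ValueError in A (B raises there too).
def Pre_solve (n : Int) (k : Int) (seq : String) : Prop :=
  ((PySem.Str.split₀ seq).all (fun t => (PySem.Int.ofStr? t).isSome)) = true
instance (n : Int) (k : Int) (seq : String) : Decidable (Pre_solve n k seq) := by
  unfold Pre_solve; infer_instance

def pvWitness_solve : Int × Int × String := (6, 3, "3 2 1 3 2 1")

def Spec_solve (n : Int) (k : Int) (seq : String) (out : Int) : Prop := out = solve_alt n k seq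
instance (n : Int) (k : Int) (seq : String) (out : Int) : Decidable (Spec_solve n k seq out) := by
  unfold Spec_solve; infer_instance

-- ===== CLAIM (what is proved, stated in full; the proofs are below) =====
def Claim_equal_solve : Prop := ∀ (n : Int) (k : Int) (seq : String),
  Dom_solve n k seq → Pre_solve n k seq → Spec_solve n k seq (solve n k seq)

-- ===== LEMMAS AND PROOFS =====

-- spec-side structural countdown check and count, used to bridge the two ports
def desc (e : Int) : List Int → Bool
  | [] => false
  | c :: r => if c = e then (if e = 1 then true else desc (e - 1) r) else false

def cntStruct (k : Int) : List Int → Int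
  | [] => 0
  | c :: r => (if c = k ∧ desc (k - 1) r then 1 else 0) + cntStruct k r

lemma descendsB_eq_desc (nums : List Int) :
    ∀ (d j : Nat) (e : Int), nums.length - j = d →
    descendsB nums j e = desc e (nums.drop j) := by
  intro d
  induction d with
  | zero =>
    intro j e h
    have hj : nums.length ≤ j := by omega
    rw [descendsB]
    simp [Nat.not_lt.2 hj, List.drop_eq_nil_of_le hj, desc]
  | succ d ih =>
    intro j e h
    rw [descendsB]
    by_cases hj : j < nums.length
    · have hdrop : nums.drop j = nums[j] :: nums.drop (j + 1) := List.drop_eq_getElem_cons hj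
      rw [hdrop]
      simp only [hj, dif_pos, desc]
      split_ifs with h1 h2 <;> simp_all [ih (j + 1) (e - 1) (by omega)]
    · simp [hj, List.drop_eq_nil_of_le (by omega : nums.length ≤ j), desc]

-- B's indexed fold, from start offset s, counts cntStruct of the suffix
lemma foldB_eq_cntStruct (nums : List Int) (k : Int) :
    ∀ (m s : Nat) (acc : Int), s + m = nums.length →
    (List.range' s m).foldl
      (fun cnt i => if nums.getD i 0 = k ∧ descendsB nums (i + 1) (k - 1) then cnt + 1 else cnt) acc
      = acc + cntStruct k (nums.drop s) := by
  intro m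
  induction m with
  | zero =>
    intro s acc h
    simp [List.drop_eq_nil_of_le (by omega : nums.length ≤ s), cntStruct]
  | succ m ih =>
    intro s acc h
    have hs : s < nums.length := by omega
    have hdrop : nums.drop s = nums[s] :: nums.drop (s + 1) := List.drop_eq_getElem_cons hs
    rw [List.range'_succ, List.foldl_cons, ih (s + 1) _ (by omega), hdrop]
    simp only [cntStruct, descendsB_eq_desc nums (nums.length - (s + 1)) (s + 1) (k - 1) rfl,
      List.getD_eq_getElem?_getD, List.getElem?_eq_getElem hs, Option.getD_some]
    split_ifs with hcond <;> ring

-- A's loop at the int level (stepA with the parse factored out; definitionally equal)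
def stepAI (k : Int) (st : Option Int × Bool × Int) (c : Int) : Option Int × Bool × Int :=
  let prev := st.1
  let inSeq := st.2.1
  let cnt := st.2.2
  let p := if inSeq then
             (if c ≠ prev.getD 0 - 1 then (false, cnt)
              else if c = 1 then (false, cnt + 1)
              else (inSeq, cnt))
           else (inSeq, cnt)
  let inSeq' := if c = k then true else p.1
  (some c, inSeq', p.2)

-- the state-machine invariant: an active countdown from p (p ≤ k) contributes 1
-- iff the suffix starts with p-1, p-2, …, 1; everything else is counted by cntStruct
lemma runA_invariant (k : Int) (nums : List Int) :
    (∀ (p cnt : Int), p ≤ k →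
      (nums.foldl (stepAI k) (some p, true, cnt)).2.2
        = cnt + (if desc (p - 1) nums then 1 else 0) + cntStruct k nums)
    ∧ (∀ (prev : Option Int) (cnt : Int),
      (nums.foldl (stepAI k) (prev, false, cnt)).2.2 = cnt + cntStruct k nums) := by
  induction nums with
  | nil => simp [desc, cntStruct]
  | cons c rest ih =>
    constructor
    · intro p cnt hpk
      by_cases hcp : c = p - 1
      · by_cases hc1 : c = 1
        · -- countdown completes here; c = 1 < k (since p = 2 ≤ k), so no restart
          have hck : ¬ c = k := by omega
          have hp1 : p - 1 = 1 := by omega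
          have hpk' : ¬ p - 1 = k := by omega
          have hk1 : ¬ (1 : Int) = k := by omega
          have hstep : stepAI k (some p, true, cnt) c = (some c, false, cnt + 1) := by
            simp only [stepAI, Option.getD_some]
            split_ifs <;> first | rfl | (exfalso; omega)
          rw [List.foldl_cons, hstep, ih.2]
          simp [desc, cntStruct, hcp.symm, hc1, hp1, hk1]
        · -- countdown continues with expectation c - 1; c = p - 1 < k, so no restart
          have hck : ¬ c = k := by omega
          have hp1 : ¬ p - 1 = 1 := by omega
          have hpk' : ¬ p - 1 = k := by omega
          have hstep : stepAI k (some p, true, cnt) c = (some c, true, cnt) := by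
            simp only [stepAI, Option.getD_some]
            split_ifs <;> first | rfl | (exfalso; omega)
          rw [List.foldl_cons, hstep, ih.1 c cnt (by omega)]
          simp [desc, cntStruct, hcp, hp1, hck, hpk']
      · -- mismatch: the countdown dies; a fresh start iff c = k
        by_cases hck : c = k
        · subst hck
          have hstep : stepAI c (some p, true, cnt) c = (some c, true, cnt) := by
            simp only [stepAI, Option.getD_some]
            split_ifs <;> first | rfl | (exfalso; omega)
          rw [List.foldl_cons, hstep, ih.1 c cnt le_rfl]
          simp only [desc, cntStruct, if_neg hcp]
          simp
          split_ifs <;> ring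
        · have hstep : stepAI k (some p, true, cnt) c = (some c, false, cnt) := by
            simp only [stepAI, Option.getD_some]
            split_ifs <;> first | rfl | (exfalso; omega)
          rw [List.foldl_cons, hstep, ih.2]
          simp [desc, cntStruct, hcp, hck]
    · intro prev cnt
      by_cases hck : c = k
      · subst hck
        have hstep : stepAI c (prev, false, cnt) c = (some c, true, cnt) := by
          simp [stepAI]
        rw [List.foldl_cons, hstep, ih.1 c cnt le_rfl]
        simp only [cntStruct, true_and]
        split_ifs <;> ring
      · have hstep : stepAI k (prev, false, cnt) c = (some c, false, cnt) := by
          simp [stepAI, hck]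
        rw [List.foldl_cons, hstep, ih.2]
        simp [cntStruct, hck]

-- ===== VERDICT (by name: the statement is the Claim_ definition above) =====
theorem solve_spec : Claim_equal_solve := by
  intro n k seq _ _
  show solve n k seq = solve_alt n k seq
  set nums := (PySem.Str.split₀ seq).map (fun t => (PySem.Int.ofStr? t).getD 0) with hn
  have hB : solve_alt n k seq = 0 + cntStruct k (nums.drop 0) := by
    rw [show solve_alt n k seq
          = (List.range nums.length).foldl
              (fun cnt i => if nums.getD i 0 = k ∧ descendsB nums (i + 1) (k - 1) then cnt + 1 else cnt)
              0 from rfl,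
        List.range_eq_range']
    exact foldB_eq_cntStruct nums k nums.length 0 0 (by omega)
  have hL : solve n k seq = 0 + cntStruct k nums := by
    show ((PySem.Str.split₀ seq).foldl (stepA k) (none, false, 0)).2.2 = _
    have hmap : (PySem.Str.split₀ seq).foldl (stepA k) (none, false, 0)
        = nums.foldl (stepAI k) (none, false, 0) := by
      rw [hn, List.foldl_map]; rfl
    rw [hmap, (runA_invariant k nums).2 none 0]
  rw [hL, hB]
  simp
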